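-- pv_equiv track=rewrite | github.com/Rohan-Bhujbal/ecommerce_platform | file/files.py | user_id_encryption
-- ===== SOURCE A (Python) =====
-- def user_id_encryption(user_id):
--     output2 = ""
--     output1 = ""
--     output = ""
--     user_id_list = str(user_id).split("-")
--     for x in user_id_list:
--         output1 = output1 + x[::2]
--         output2 = output2 + x[1::2]
--     output = output1[1::2] + output2[1::2] + output1[::2] + output2[::2]
--     return output
-- ===== SOURCE B (Python) =====
-- def user_id_encryption(user_id):
--     # One pass: distribute each character directly into one of four buckets,
--     # with boolean toggles tracking stream alternation and in-stream parity.
--     a = []; b = []; c = []; d = []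
--     s1_even = True  # next stream-1 char lands at an even position of stream 1
--     s2_even = True
--     for seg in str(user_id).split("-"):
--         to_first = True  # chars of a segment alternate between the two streams
--         for ch in seg:
--             if to_first:
--                 if s1_even:
--                     c.append(ch)
--                 else:
--                     a.append(ch)
--                 s1_even = not s1_even
--             else:
--                 if s2_even:
--                     d.append(ch)
--                 else:
--                     b.append(ch)
--                 s2_even = not s2_even
--             to_first = not to_first
--     return "".join(a + b + c + d)
-- ===== Notes on version B (the rewrite author's own statement) =====
-- stated objective: alternative
-- what changed: A builds two intermediate strings by repeated step-2 slicing and concatenation and then re-slices each of them; B makes a single pass over the characters, distributing each one directly into one of four output buckets using boolean parity toggles (no slicing, no intermediate strings).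
import Mathlib
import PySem

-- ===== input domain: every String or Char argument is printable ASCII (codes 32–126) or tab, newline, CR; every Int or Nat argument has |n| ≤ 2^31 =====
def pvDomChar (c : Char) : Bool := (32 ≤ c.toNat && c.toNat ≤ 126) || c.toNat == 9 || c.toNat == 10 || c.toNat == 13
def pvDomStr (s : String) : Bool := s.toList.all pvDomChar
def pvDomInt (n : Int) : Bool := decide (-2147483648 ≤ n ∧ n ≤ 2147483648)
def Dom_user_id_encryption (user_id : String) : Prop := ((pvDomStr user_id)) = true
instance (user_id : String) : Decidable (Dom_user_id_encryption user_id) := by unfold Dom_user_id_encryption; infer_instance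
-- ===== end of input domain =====

-- B replaces A's slice-and-concatenate passes by a single pass that distributes each
-- character into one of four buckets using boolean parity toggles (objective: alternative).

-- ===== PORT A =====
-- Strings are handled as their code-point lists (PySem.Chars); the step-2 slices are
-- PySem.List.slice? with .getD [] (step = 2 ≠ 0, so slice? always returns some).
def user_id_encryption (user_id : String) : String :=
  let user_id_list := PySem.Chars.splitOn user_id.toList ['-']
  let r := user_id_list.foldl
    (fun (acc : List Char × List Char) x =>
      (acc.1 ++ (PySem.List.slice? x none none 2).getD [],
       acc.2 ++ (PySem.List.slice? x (some 1) none 2).getD [])) ([], [])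
  String.ofList ((PySem.List.slice? r.1 (some 1) none 2).getD []
    ++ (PySem.List.slice? r.2 (some 1) none 2).getD []
    ++ (PySem.List.slice? r.1 none none 2).getD []
    ++ (PySem.List.slice? r.2 none none 2).getD [])

-- ===== PORT B =====
-- state: (a, b, c, d, s1_even, s2_even); the inner fold threads the per-segment to_first flag.
def pvBStep (st : (List Char × List Char × List Char × List Char × Bool × Bool) × Bool)
    (ch : Char) : (List Char × List Char × List Char × List Char × Bool × Bool) × Bool :=
  match st with
  | ((a, b, c, d, s1, s2), toFirst) =>
    if toFirst then
      if s1 then ((a, b, c ++ [ch], d, !s1, s2), !toFirst)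
      else ((a ++ [ch], b, c, d, !s1, s2), !toFirst)
    else
      if s2 then ((a, b, c, d ++ [ch], s1, !s2), !toFirst)
      else ((a, b ++ [ch], c, d, s1, !s2), !toFirst)

def user_id_encryption_alt (user_id : String) : String :=
  let segs := PySem.Chars.splitOn user_id.toList ['-']
  let st := segs.foldl (fun st seg => (seg.foldl pvBStep (st, true)).1)
    ([], [], [], [], true, true)
  match st with
  | (a, b, c, d, _, _) => String.ofList (a ++ b ++ c ++ d)

-- ===== PRECONDITION & SPEC =====
def Spec_user_id_encryption (user_id : String) (out : String) : Prop := out = user_id_encryption_alt user_id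
instance (user_id : String) (out : String) : Decidable (Spec_user_id_encryption user_id out) := by unfold Spec_user_id_encryption; infer_instance

-- ===== CLAIM (what is proved, stated in full; the proofs are below) =====
def Claim_equal_user_id_encryption : Prop := ∀ (user_id : String), Dom_user_id_encryption user_id → Spec_user_id_encryption user_id (user_id_encryption user_id)

-- ===== LEMMAS AND PROOFS =====

-- pvSA splits a list into its even-index and odd-index elements
def pvSA {α : Type} : List α → List α × List α
  | [] => ([], [])
  | x :: xs => (x :: (pvSA xs).2, (pvSA xs).1)

theorem pvSA_get? {α : Type} (xs : List α) :
    ∀ i, (pvSA xs).1[i]? = xs[2 * i]? ∧ (pvSA xs).2[i]? = xs[2 * i + 1]? := by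
  induction xs with
  | nil => intro i; simp [pvSA]
  | cons x xs ih =>
    intro i
    refine ⟨?_, ?_⟩
    · cases i with
      | zero => simp [pvSA]
      | succ n =>
        have h := (ih n).2
        have h2 : 2 * (n + 1) = 2 * n + 1 + 1 := by omega
        simp [pvSA, h2, h]
    · have h := (ih i).1
      simp [pvSA, h]

theorem pv_slice_evens (xs : List Char) :
    PySem.List.slice? xs none none 2 = some (pvSA xs).1 := by
  unfold PySem.List.slice? PySem.List.sliceIndices
  norm_num
  have hc : (if 0 < xs.length then (((xs.length : ℤ) + 2 - 1) / 2).toNat else 0)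
      = (xs.length + 1) / 2 := by split <;> omega
  rw [hc]
  apply List.ext_getElem?
  intro i
  rw [(pvSA_get? xs i).1]
  have hcongr : List.filterMap (fun k : Nat => xs[(2 * (k : ℤ)).toNat]?)
        (List.range ((xs.length + 1) / 2))
      = List.map (fun k : Nat => xs.getD (2 * k) default) (List.range ((xs.length + 1) / 2)) := by
    rw [← List.filterMap_eq_map]
    apply List.filterMap_congr
    intro k hk
    simp only [List.mem_range] at hk
    have h2k : 2 * k < xs.length := by omega
    have ht : (2 * (k : ℤ)).toNat = 2 * k := by omega
    simp [ht, List.getElem?_eq_getElem h2k]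
  rw [hcongr, List.getElem?_map]
  by_cases hi : i < (xs.length + 1) / 2
  · have h2i : 2 * i < xs.length := by omega
    rw [List.getElem?_range hi]
    simp [List.getElem?_eq_getElem h2i, List.getD_eq_getElem?_getD]
  · have h2i : ¬ 2 * i < xs.length := by omega
    rw [List.getElem?_eq_none (by simpa using hi)]
    simp [List.getElem?_eq_none (by omega : xs.length ≤ 2 * i)]

theorem pv_slice_odds (xs : List Char) :
    PySem.List.slice? xs (some 1) none 2 = some (pvSA xs).2 := by
  rcases xs with _ | ⟨y, ys⟩
  · decide
  unfold PySem.List.slice? PySem.List.sliceIndices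
  norm_num
  have hc : (if 0 < ys.length then (((ys.length : ℤ) + 2 - 1) / 2).toNat else 0)
      = (y :: ys).length / 2 := by
    simp only [List.length_cons]; split <;> omega
  rw [hc]
  apply List.ext_getElem?
  intro i
  rw [(pvSA_get? (y :: ys) i).2]
  have hcongr : List.filterMap (fun k : Nat => (y :: ys)[(1 + 2 * (k : ℤ)).toNat]?)
        (List.range ((y :: ys).length / 2))
      = List.map (fun k : Nat => (y :: ys).getD (2 * k + 1) default)
        (List.range ((y :: ys).length / 2)) := by
    rw [← List.filterMap_eq_map]
    apply List.filterMap_congr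
    intro k hk
    simp only [List.mem_range] at hk
    have h2k : 2 * k + 1 < (y :: ys).length := by simp at hk ⊢; omega
    have ht : (1 + 2 * (k : ℤ)).toNat = 2 * k + 1 := by omega
    have h2k' : 2 * k < ys.length := by simp at h2k; omega
    simp [ht, List.getElem?_eq_getElem h2k, List.getElem?_eq_getElem h2k']
  rw [hcongr, List.getElem?_map]
  by_cases hi : i < (y :: ys).length / 2
  · have h2i : 2 * i + 1 < (y :: ys).length := by simp at hi ⊢; omega
    rw [List.getElem?_range hi]
    have h2i' : 2 * i < ys.length := by simp at h2i; omega
    simp [List.getElem?_eq_getElem h2i, List.getD_eq_getElem?_getD,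
      List.getElem?_eq_getElem h2i']
  · have h2i : ¬ 2 * i + 1 < (y :: ys).length := by simp at hi ⊢; omega
    rw [List.getElem?_eq_none (by simpa using hi)]
    simp [List.getElem?_eq_none (by omega : (y :: ys).length ≤ 2 * i + 1)]

theorem pvSA_snoc {α : Type} (u : List α) (ch : α) :
    pvSA (u ++ [ch]) =
      if u.length % 2 = 0 then ((pvSA u).1 ++ [ch], (pvSA u).2)
      else ((pvSA u).1, (pvSA u).2 ++ [ch]) := by
  induction u with
  | nil => simp [pvSA]
  | cons x u ih =>
    simp only [List.cons_append, pvSA, ih]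
    by_cases h : u.length % 2 = 0
    · have h2 : ¬ (x :: u).length % 2 = 0 := by simp [List.length_cons]; omega
      simp [h]; omega
    · have h2 : (x :: u).length % 2 = 0 := by simp [List.length_cons]; omega
      simp [h]; omega

-- the B-state corresponding to accumulated streams u (stream 1) and v (stream 2)
def pvMkSt (u v : List Char) : List Char × List Char × List Char × List Char × Bool × Bool :=
  ((pvSA u).2, (pvSA v).2, (pvSA u).1, (pvSA v).1,
   decide (u.length % 2 = 0), decide (v.length % 2 = 0))

theorem pv_step_true (u v : List Char) (ch : Char) :
    pvBStep (pvMkSt u v, true) ch = (pvMkSt (u ++ [ch]) v, false) := by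
  by_cases h : u.length % 2 = 0 <;>
    simp [pvBStep, pvMkSt, pvSA_snoc, h] <;> omega

theorem pv_step_false (u v : List Char) (ch : Char) :
    pvBStep (pvMkSt u v, false) ch = (pvMkSt u (v ++ [ch]), true) := by
  by_cases h : v.length % 2 = 0 <;>
    simp [pvBStep, pvMkSt, pvSA_snoc, h] <;> omega

theorem pv_bfold (x : List Char) : ∀ (u v : List Char),
    (x.foldl pvBStep (pvMkSt u v, true)
      = (pvMkSt (u ++ (pvSA x).1) (v ++ (pvSA x).2), decide (x.length % 2 = 0))) ∧
    (x.foldl pvBStep (pvMkSt u v, false)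
      = (pvMkSt (u ++ (pvSA x).2) (v ++ (pvSA x).1), !decide (x.length % 2 = 0))) := by
  induction x with
  | nil => intro u v; simp [pvSA]
  | cons ch x ih =>
    intro u v
    constructor
    · rw [List.foldl_cons, pv_step_true, (ih (u ++ [ch]) v).2]
      simp only [pvSA, List.length_cons, List.append_assoc, List.singleton_append,
        Prod.mk.injEq, and_true, true_and]
      by_cases h : x.length % 2 = 0
      · have h2 : (x.length + 1) % 2 = 1 := by omega
        simp [h, h2]
      · have h2 : (x.length + 1) % 2 = 0 := by omega
        simp [h, h2]
    · rw [List.foldl_cons, pv_step_false, (ih u (v ++ [ch])).1]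
      simp only [pvSA, List.length_cons, List.append_assoc, List.singleton_append,
        Prod.mk.injEq, and_true, true_and]
      by_cases h : x.length % 2 = 0
      · have h2 : (x.length + 1) % 2 = 1 := by omega
        simp [h, h2]
      · have h2 : (x.length + 1) % 2 = 0 := by omega
        simp [h, h2]

theorem pv_outer (segs : List (List Char)) : ∀ (u v : List Char),
    segs.foldl (fun st seg => (seg.foldl pvBStep (st, true)).1) (pvMkSt u v)
      = pvMkSt
        (segs.foldl (fun acc x => acc ++ (pvSA x).1) u)
        (segs.foldl (fun acc x => acc ++ (pvSA x).2) v) := by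
  induction segs with
  | nil => intro u v; simp
  | cons seg segs ih =>
    intro u v
    rw [List.foldl_cons, List.foldl_cons, List.foldl_cons]
    have h := (pv_bfold seg u v).1
    rw [h]
    exact ih (u ++ (pvSA seg).1) (v ++ (pvSA seg).2)

theorem pv_pairfold (segs : List (List Char)) : ∀ (u v : List Char),
    segs.foldl (fun (acc : List Char × List Char) x =>
        (acc.1 ++ (pvSA x).1, acc.2 ++ (pvSA x).2)) (u, v)
      = (segs.foldl (fun acc x => acc ++ (pvSA x).1) u,
         segs.foldl (fun acc x => acc ++ (pvSA x).2) v) := by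
  induction segs with
  | nil => intro u v; simp
  | cons seg segs ih =>
    intro u v
    rw [List.foldl_cons, List.foldl_cons, List.foldl_cons]
    exact ih (u ++ (pvSA seg).1) (v ++ (pvSA seg).2)

-- ===== VERDICT (by name: the statement is the Claim_ definition above) =====
theorem user_id_encryption_spec : Claim_equal_user_id_encryption := by
  intro uid _
  unfold Spec_user_id_encryption user_id_encryption user_id_encryption_alt
  simp only [pv_slice_evens, pv_slice_odds, Option.getD_some]
  rw [pv_pairfold]
  have hinit : (([], [], [], [], true, true) :
      List Char × List Char × List Char × List Char × Bool × Bool) = pvMkSt [] [] := rfl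
  rw [hinit, pv_outer]
  rfl
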